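-- pv_equiv track=rewrite | github.com/HealthRex/CDSS | medinfo/db/ResultsFormatter.py | sanitizeNames
-- ===== SOURCE A (Python) =====
-- def sanitizeNames(names):
--     """Given a list of name strings,
--     replace any non-alphanumerics with underscore _.
--     Lowercase characters only
--     Also ensure unique column names (append numerical suffixes if duplicates)
--     """
--     newNames = list();
--     newNameSet = set();
--     for i, oldName in enumerate(names):
--         newColChars = list();
--         for char in oldName:
--             if char.isalnum():
--                 newColChars.append(char);
--             else:
--                 newColChars.append("_");
--         newName = str.join("", newColChars);
--         newName = newName.lower();
--         if newName in newNameSet:    # Duplicates, start trying modifying with suffixes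
--             iSuffix = 1;
--             modName = "%s_%s" % (newName,iSuffix);
--             while modName in newNameSet:
--                 iSuffix += 1
--                 modName = "%s_%s" % (newName,iSuffix);
--             newName = modName;  # Found one not a duplicate
--         newNames.append(newName);
--         newNameSet.add(newName);
--     return newNames;
-- ===== SOURCE B (Python) =====
-- def sanitizeNames(names):
--     """Sanitize then deduplicate in two staged passes.  A synthesized name
--     base_k can never collide with a later suffix candidate (the base/suffix
--     decomposition at the last underscore is unique and per-base suffixes only
--     grow), so the probe loop checks only names emitted verbatim, resuming from
--     a per-base counter: the total number of probes is linear."""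
--     bases = ["".join(c if c.isalnum() else "_" for c in n).lower() for n in names]
--     verbatim = set()    # names emitted exactly as their sanitized base
--     suffixed = set()    # names synthesized as base_k
--     nxt = {}            # per-base next suffix to try
--     out = []
--     for base in bases:
--         if base in verbatim or base in suffixed:
--             k = nxt.get(base, 1)
--             while "%s_%s" % (base, k) in verbatim:
--                 k += 1
--             name = "%s_%s" % (base, k)
--             nxt[base] = k + 1
--             suffixed.add(name)
--         else:
--             name = base
--             verbatim.add(name)
--         out.append(name)
--     return out
-- ===== Notes on version B (the rewrite author's own statement) =====
-- stated objective: faster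
-- what changed: B first sanitizes all names in one pass, then deduplicates maintaining two separate sets (verbatim-emitted vs synthesized names) plus a per-base counter; since a synthesized name can never collide with a later candidate (unique base/suffix decomposition at the last underscore, and per-base suffixes only grow), the probe loop consults only the verbatim set and never restarts, making total probe work linear instead of A's restart-from-1 scan against the full seen-set.
import Mathlib
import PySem

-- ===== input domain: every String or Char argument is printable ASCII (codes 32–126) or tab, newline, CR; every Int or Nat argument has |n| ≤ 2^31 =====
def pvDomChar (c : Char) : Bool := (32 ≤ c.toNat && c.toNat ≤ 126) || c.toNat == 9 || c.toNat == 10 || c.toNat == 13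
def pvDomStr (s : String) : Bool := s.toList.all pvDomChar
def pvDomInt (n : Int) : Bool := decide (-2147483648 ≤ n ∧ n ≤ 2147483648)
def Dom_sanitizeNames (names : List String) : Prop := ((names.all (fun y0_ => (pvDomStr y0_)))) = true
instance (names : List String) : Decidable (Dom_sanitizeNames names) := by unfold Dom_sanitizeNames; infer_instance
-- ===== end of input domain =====

-- B sanitizes in a staged first pass, then deduplicates keeping the verbatim-emitted and
-- synthesized names in separate sets plus a per-base counter: a synthesized base_k never
-- collides with a later candidate (the base/suffix decomposition is unique and per-base
-- suffixes only grow), so the probe loop consults only the verbatim set and never restarts.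

-- shared formatting helper: "%s_%s" % (base, i)
def pvCand (b : List Char) (i : Nat) : List Char := b ++ '_' :: PySem.Int.toChars (i : Int)

-- ===== PORT A =====
def aSanitize (old : List Char) : List Char :=
  PySem.Chars.lower (old.foldl (fun acc c => acc ++ [if PySem.Chars.isalnum c then c else '_']) [])

-- A's 'while modName in newNameSet' loop; fuel S.length + 1 is exact: the candidate
-- strings are pairwise distinct, so a free one is met within |S|+1 probes (lemma pv_exists_free below)
def aFindSuffix (S : PySem.Set (List Char)) (b : List Char) (i : Nat) : Nat → List Char
  | 0 => pvCand b i
  | fuel+1 => if PySem.Set.contains S (pvCand b i) then aFindSuffix S b (i+1) fuel else pvCand b i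

def aStep (st : List String × PySem.Set (List Char)) (oldName : String) :
    List String × PySem.Set (List Char) :=
  let b := aSanitize oldName.toList
  let nn := if PySem.Set.contains st.2 b then aFindSuffix st.2 b 1 (st.2.length + 1) else b
  (st.1 ++ [String.ofList nn], PySem.Set.add st.2 nn)

def sanitizeNames (names : List String) : List String :=
  (names.foldl aStep ([], PySem.Set.empty)).1

-- ===== PORT B =====
def bSanitize (old : List Char) : List Char :=
  PySem.Chars.lower (old.map (fun c => if PySem.Chars.isalnum c then c else '_'))

-- B's 'while "%s_%s" % (base, k) in verbatim' loop: probes only the verbatim set V,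
-- starting at the stored counter; returns the final counter with the name.
-- fuel V.length + 1 is exact (a free candidate is met within |V|+1 probes)
def bFind (V : PySem.Set (List Char)) (b : List Char) (i : Nat) : Nat → Nat × List Char
  | 0 => (i, pvCand b i)
  | fuel+1 => if PySem.Set.contains V (pvCand b i) then bFind V b (i+1) fuel
              else (i, pvCand b i)

-- state: (out, verbatim, suffixed, nxt)
def bStep (st : List String × PySem.Set (List Char) × PySem.Set (List Char) × PySem.Dict (List Char) Nat)
    (b : List Char) :
    List String × PySem.Set (List Char) × PySem.Set (List Char) × PySem.Dict (List Char) Nat :=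
  if PySem.Set.contains st.2.1 b || PySem.Set.contains st.2.2.1 b then
    let r := bFind st.2.1 b (st.2.2.2.getD b 1) (st.2.1.length + 1)
    (st.1 ++ [String.ofList r.2], st.2.1, PySem.Set.add st.2.2.1 r.2, st.2.2.2.insert b (r.1 + 1))
  else
    (st.1 ++ [String.ofList b], PySem.Set.add st.2.1 b, st.2.2.1, st.2.2.2)

def sanitizeNames_alt (names : List String) : List String :=
  ((names.map (fun n => bSanitize n.toList)).foldl bStep
      ([], PySem.Set.empty, PySem.Set.empty, PySem.Dict.empty)).1

-- ===== PRECONDITION & SPEC =====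
def Spec_sanitizeNames (names : List String) (out : List String) : Prop := out = sanitizeNames_alt names
instance (names : List String) (out : List String) : Decidable (Spec_sanitizeNames names out) := by unfold Spec_sanitizeNames; infer_instance

-- ===== CLAIM (what is proved, stated in full; the proofs are below) =====
def Claim_equal_sanitizeNames : Prop := ∀ (names : List String), Dom_sanitizeNames names → Spec_sanitizeNames names (sanitizeNames names)

-- ===== LEMMAS AND PROOFS =====

lemma pv_digitChar_inj : ∀ a < 10, ∀ b < 10, Nat.digitChar a = Nat.digitChar b → a = b := by decide

lemma pv_digitChar_ne (a : Nat) (h : a < 10) : Nat.digitChar a ≠ '_' := by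
  interval_cases a <;> decide

lemma pv_toDigits_ten_inj (m : Nat) : ∀ n, Nat.toDigits 10 m = Nat.toDigits 10 n → m = n := by
  induction m using Nat.strong_induction_on with
  | _ m ih =>
    intro n h
    rw [Nat.toDigits_eq_if (by norm_num), Nat.toDigits_eq_if (b := 10) (n := n) (by norm_num)] at h
    by_cases hm : m < 10 <;> by_cases hn : n < 10 <;> simp only [hm, hn, if_false, if_pos] at h
    · exact pv_digitChar_inj m hm n hn (List.singleton_injective h)
    · exfalso
      have hlen := congrArg List.length h
      have hpos : 0 < (Nat.toDigits 10 (n / 10)).length := Nat.length_toDigits_pos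
      rw [List.length_singleton, List.length_append, List.length_singleton] at hlen; omega
    · exfalso
      have hlen := congrArg List.length h
      have hpos : 0 < (Nat.toDigits 10 (m / 10)).length := Nat.length_toDigits_pos
      rw [List.length_append, List.length_singleton, List.length_singleton] at hlen; omega
    · obtain ⟨h1, h2⟩ := List.append_inj' h (by simp)
      have hdiv := ih (m / 10) (by omega) (n / 10) h1
      have hmod := pv_digitChar_inj (m % 10) (by omega) (n % 10) (by omega)
        (List.singleton_injective h2)
      omega

lemma pv_toDigits_no_underscore (m : Nat) : '_' ∉ Nat.toDigits 10 m := by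
  induction m using Nat.strong_induction_on with
  | _ m ih =>
    rw [Nat.toDigits_eq_if (by norm_num)]
    by_cases hm : m < 10
    · rw [if_pos hm]
      simp only [List.mem_singleton]
      exact fun h => pv_digitChar_ne m hm h.symm
    · rw [if_neg hm]
      intro h
      rcases List.mem_append.mp h with h1 | h2
      · exact ih (m / 10) (by omega) h1
      · exact pv_digitChar_ne (m % 10) (by omega) (List.mem_singleton.mp h2).symm

lemma pv_toChars_eq (i : Nat) : PySem.Int.toChars (i : Int) = Nat.toDigits 10 i := by
  unfold PySem.Int.toChars
  rw [if_neg (by omega)]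
  simp

-- string splitting: with underscore-free tails, p ++ '_'::d1 = b ++ '_'::d2 forces p = b, d1 = d2
lemma pv_split_inj : ∀ (p b d1 d2 : List Char), '_' ∉ d1 → '_' ∉ d2 →
    p ++ '_' :: d1 = b ++ '_' :: d2 → p = b ∧ d1 = d2 := by
  intro p
  induction p with
  | nil =>
    intro b d1 d2 h1 h2 h
    cases b with
    | nil => simpa using h
    | cons c b' =>
      simp only [List.nil_append, List.cons_append, List.cons.injEq] at h
      exact absurd (h.2 ▸ List.mem_append.mpr (Or.inr (List.mem_cons_self ..))) h1
  | cons c p' ih =>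
    intro b d1 d2 h1 h2 h
    cases b with
    | nil =>
      simp only [List.cons_append, List.nil_append, List.cons.injEq] at h
      exact absurd (h.2 ▸ List.mem_append.mpr (Or.inr (List.mem_cons_self ..))) h2
    | cons c' b' =>
      simp only [List.cons_append, List.cons.injEq] at h
      obtain ⟨hp, hd⟩ := ih b' d1 d2 h1 h2 h.2
      exact ⟨by rw [h.1, hp], hd⟩

-- full injectivity of the candidate formatter, in both arguments
lemma pv_cand_inj2 {p b : List Char} {j k : Nat} (h : pvCand p j = pvCand b k) :
    p = b ∧ j = k := by
  unfold pvCand at h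
  rw [pv_toChars_eq, pv_toChars_eq] at h
  obtain ⟨hp, hd⟩ := pv_split_inj p b _ _ (pv_toDigits_no_underscore j)
    (pv_toDigits_no_underscore k) h
  exact ⟨hp, pv_toDigits_ten_inj j k hd⟩

lemma pv_cand_inj (b : List Char) {i j : Nat} (h : pvCand b i = pvCand b j) : i = j :=
  (pv_cand_inj2 h).2

lemma pv_contains_iff (S : PySem.Set (List Char)) (x : List Char) :
    PySem.Set.contains S x = true ↔ x ∈ S := by
  simp [PySem.Set.contains]

lemma pv_exists_free (S : List (List Char)) (b : List Char) (i : Nat) :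
    ∃ k, i ≤ k ∧ k ≤ i + S.length ∧ pvCand b k ∉ S := by
  by_contra hcon
  simp only [not_exists, not_and, not_not] at hcon
  have hmaps : ∀ k ∈ Finset.Icc i (i + S.length), pvCand b k ∈ S.toFinset := by
    intro k hk
    rw [List.mem_toFinset]
    exact hcon k (Finset.mem_Icc.mp hk).1 (Finset.mem_Icc.mp hk).2
  have hinj : Set.InjOn (pvCand b) ↑(Finset.Icc i (i + S.length)) :=
    fun x _ y _ h => pv_cand_inj b h
  have hcard := Finset.card_le_card_of_injOn _ hmaps hinj
  have h1 : (Finset.Icc i (i + S.length)).card = S.length + 1 := by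
    rw [Nat.card_Icc]; omega
  have h2 := S.toFinset_card_le
  omega

lemma pv_aFind_eq (S : PySem.Set (List Char)) (b : List Char) {f : Nat} :
    ∀ {i fuel : Nat}, i ≤ f → f < i + fuel → pvCand b f ∉ S →
    (∀ k, i ≤ k → k < f → pvCand b k ∈ S) →
    aFindSuffix S b i fuel = pvCand b f := by
  intro i fuel
  induction fuel generalizing i with
  | zero => omega
  | succ fuel ih =>
    intro hif hfuel hfree hocc
    simp only [aFindSuffix]
    by_cases hi : i = f
    · subst hi
      rw [if_neg (by simp only [pv_contains_iff]; exact hfree)]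
    · rw [if_pos ((pv_contains_iff ..).mpr (hocc i le_rfl (by omega)))]
      exact ih (by omega) (by omega) hfree (fun k hk1 hk2 => hocc k (by omega) hk2)

lemma pv_bFind_eq (V : PySem.Set (List Char)) (b : List Char) {f : Nat} :
    ∀ {i fuel : Nat}, i ≤ f → f < i + fuel → pvCand b f ∉ V →
    (∀ k, i ≤ k → k < f → pvCand b k ∈ V) →
    bFind V b i fuel = (f, pvCand b f) := by
  intro i fuel
  induction fuel generalizing i with
  | zero => omega
  | succ fuel ih =>
    intro hif hfuel hfree hocc
    simp only [bFind]
    by_cases hi : i = f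
    · subst hi
      rw [if_neg (by simp only [pv_contains_iff]; exact hfree)]
    · rw [if_pos ((pv_contains_iff ..).mpr (hocc i le_rfl (by omega)))]
      exact ih (by omega) (by omega) hfree (fun k hk1 hk2 => hocc k (by omega) hk2)

-- invariant linking A's single seen-set S to B's (verbatim V, suffixed G, counters C):
-- S = V ∪ G as sets; every suffixed name is a candidate below its base's counter;
-- counters are ≥ 1 and every suffix below a counter is already taken in S
def pvInv (S V G : PySem.Set (List Char)) (C : PySem.Dict (List Char) Nat) : Prop :=
  (∀ x : List Char, x ∈ S ↔ (x ∈ V ∨ x ∈ G)) ∧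
  (∀ x ∈ G, ∃ p j, x = pvCand p j ∧ 1 ≤ j ∧ j < C.getD p 1) ∧
  (∀ b : List Char, 1 ≤ C.getD b 1 ∧ ∀ k, 1 ≤ k → k < C.getD b 1 → pvCand b k ∈ S)

lemma pv_san_eq (old : List Char) : aSanitize old = bSanitize old := by
  unfold aSanitize bSanitize
  rw [PySem.List.foldl_append_singleton_eq_map]
  simp

lemma pv_loop_eq (names : List String) :
    ∀ (out : List String) (S V G : PySem.Set (List Char)) (C : PySem.Dict (List Char) Nat),
    pvInv S V G C →
    (names.foldl aStep (out, S)).1 =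
      ((names.map (fun n => bSanitize n.toList)).foldl bStep (out, V, G, C)).1 := by
  induction names with
  | nil => intro out S V G C _; rfl
  | cons name names ih =>
    intro out S V G C hInv
    obtain ⟨inv1, inv2, inv3⟩ := hInv
    simp only [List.map_cons, List.foldl_cons]
    set b := bSanitize name.toList with hb
    by_cases hmem : b ∈ S
    · -- duplicate: A probes S from 1, B probes only V from the stored counter; same result
      set c := C.getD b 1 with hc
      have hc1 : 1 ≤ c := (inv3 b).1
      have hexS : ∃ k, 1 ≤ k ∧ pvCand b k ∉ S := by
        obtain ⟨k, hk1, _, hk3⟩ := pv_exists_free S b 1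
        exact ⟨k, hk1, hk3⟩
      set f := Nat.find hexS with hfdef
      obtain ⟨hf1, hffree⟩ := Nat.find_spec hexS
      have hoccS : ∀ k, 1 ≤ k → k < f → pvCand b k ∈ S := by
        intro k h1 h2
        by_contra hcon
        exact Nat.find_min hexS h2 ⟨h1, hcon⟩
      have hcf : c ≤ f := by
        rcases Nat.lt_or_ge f c with h | h
        · exact absurd ((inv3 b).2 f hf1 h) hffree
        · exact h
      -- for k ≥ c, membership in S coincides with membership in V
      have hSV : ∀ k, c ≤ k → (pvCand b k ∈ S ↔ pvCand b k ∈ V) := by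
        intro k hk
        constructor
        · intro hS
          rcases (inv1 _).mp hS with hV | hG
          · exact hV
          · obtain ⟨p, j, hpj, hj1, hjc⟩ := inv2 _ hG
            obtain ⟨hp, hjk⟩ := pv_cand_inj2 hpj.symm
            rw [hp] at hjc
            omega
        · intro hV
          exact (inv1 _).mpr (Or.inl hV)
      have hfreeV : pvCand b f ∉ V := fun h => hffree ((inv1 _).mpr (Or.inl h))
      have hoccV : ∀ k, c ≤ k → k < f → pvCand b k ∈ V :=
        fun k h1 h2 => (hSV k h1).mp (hoccS k (by omega) h2)
      have hfleS : f ≤ 1 + S.length := by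
        obtain ⟨k, hk1, hk2, hk3⟩ := pv_exists_free S b 1
        exact le_trans (Nat.find_min' hexS ⟨hk1, hk3⟩) hk2
      have hfleV : f ≤ c + V.length := by
        obtain ⟨k, hk1, hk2, hk3⟩ := pv_exists_free V b c
        have hkS : pvCand b k ∉ S := fun h => hk3 ((hSV k hk1).mp h)
        exact le_trans (Nat.find_min' hexS ⟨by omega, hkS⟩) hk2
      have hA : aFindSuffix S b 1 (S.length + 1) = pvCand b f :=
        pv_aFind_eq S b hf1 (by omega) hffree hoccS
      have hB : bFind V b c (V.length + 1) = (f, pvCand b f) :=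
        pv_bFind_eq V b hcf (by omega) hfreeV hoccV
      have hstepA : aStep (out, S) name =
          (out ++ [String.ofList (pvCand b f)], PySem.Set.add S (pvCand b f)) := by
        simp only [aStep, pv_san_eq, ← hb]
        rw [if_pos ((pv_contains_iff ..).mpr hmem), hA]
      have hstepB : bStep (out, V, G, C) b =
          (out ++ [String.ofList (pvCand b f)], V, PySem.Set.add G (pvCand b f),
            C.insert b (f + 1)) := by
        simp only [bStep, ← hc]
        rw [if_pos (by
          rw [Bool.or_eq_true, pv_contains_iff, pv_contains_iff]
          exact (inv1 b).mp hmem), hB]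
      rw [hstepA, hstepB]
      apply ih
      refine ⟨?_, ?_, ?_⟩
      · intro x
        rw [PySem.Set.mem_add, PySem.Set.mem_add, inv1]
        tauto
      · intro x hx
        rcases (PySem.Set.mem_add ..).mp hx with hG | hx
        · obtain ⟨p, j, hpj, hj1, hjc⟩ := inv2 x hG
          refine ⟨p, j, hpj, hj1, ?_⟩
          rw [PySem.Dict.getD_insert]
          split_ifs with hpb
          · subst hpb; omega
          · exact hjc
        · exact ⟨b, f, hx, hf1, by rw [PySem.Dict.getD_insert, if_pos rfl]; omega⟩
      · intro b'
        rw [PySem.Dict.getD_insert]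
        split_ifs with hbb
        · subst hbb
          refine ⟨by omega, fun k h1 h2 => ?_⟩
          rcases Nat.lt_or_ge k c with hk | hk
          · exact (PySem.Set.mem_add ..).mpr (Or.inl ((inv3 b).2 k h1 hk))
          · rcases Nat.lt_or_ge k f with hkf | hkf
            · exact (PySem.Set.mem_add ..).mpr (Or.inl (hoccS k h1 hkf))
            · have : k = f := by omega
              subst this
              exact (PySem.Set.mem_add ..).mpr (Or.inr rfl)
        · exact ⟨(inv3 b').1, fun k h1 h2 =>
            (PySem.Set.mem_add ..).mpr (Or.inl ((inv3 b').2 k h1 h2))⟩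
    · -- fresh name: both emit the base verbatim
      have hnV : b ∉ V := fun h => hmem ((inv1 _).mpr (Or.inl h))
      have hnG : b ∉ G := fun h => hmem ((inv1 _).mpr (Or.inr h))
      have hstepA : aStep (out, S) name =
          (out ++ [String.ofList b], PySem.Set.add S b) := by
        simp only [aStep, pv_san_eq, ← hb]
        rw [if_neg (by simp only [pv_contains_iff]; exact hmem)]
      have hstepB : bStep (out, V, G, C) b =
          (out ++ [String.ofList b], PySem.Set.add V b, G, C) := by
        simp only [bStep]
        rw [if_neg (by
          simp only [Bool.or_eq_true, pv_contains_iff]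
          rintro (h | h)
          · exact hnV h
          · exact hnG h)]
      rw [hstepA, hstepB]
      apply ih
      refine ⟨?_, inv2, ?_⟩
      · intro x
        rw [PySem.Set.mem_add, PySem.Set.mem_add, inv1]
        tauto
      · intro b'
        exact ⟨(inv3 b').1, fun k h1 h2 =>
          (PySem.Set.mem_add ..).mpr (Or.inl ((inv3 b').2 k h1 h2))⟩

lemma pv_inv_empty : pvInv PySem.Set.empty PySem.Set.empty PySem.Set.empty PySem.Dict.empty := by
  refine ⟨fun x => by simp [PySem.Set.empty], fun x hx => by simp [PySem.Set.empty] at hx,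
    fun b => ⟨?_, fun k h1 h2 => ?_⟩⟩
  · simp [PySem.Dict.getD, PySem.Dict.empty, PySem.Dict.get?]
  · simp [PySem.Dict.getD, PySem.Dict.empty, PySem.Dict.get?] at h2
    omega

-- ===== VERDICT (by name: the statement is the Claim_ definition above) =====
theorem sanitizeNames_spec : Claim_equal_sanitizeNames := by
  intro names _
  unfold Spec_sanitizeNames sanitizeNames sanitizeNames_alt
  exact pv_loop_eq names [] PySem.Set.empty PySem.Set.empty PySem.Set.empty
    PySem.Dict.empty pv_inv_empty
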